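-- pv_equiv track=rewrite | github.com/ymJung/scrap | main/analyzer.py | getWordPriceMap
-- ===== SOURCE A (Python) =====
-- def getWordPriceMap(words, totalWordPrices):
--     wordPriceDict = {}
--     for word in words:
--         try:
--             totalWordPrices[word]
--         except KeyError:
--             continue
--         try:
--             wordPriceDict[word] = wordPriceDict[word] + totalWordPrices[word]
--         except KeyError:
--             wordPriceDict[word] = totalWordPrices[word]
--     return wordPriceDict
-- ===== SOURCE B (Python) =====
-- def getWordPriceMap(words, totalWordPrices):
--     counts = {}
--     for w in words:
--         counts[w] = counts.get(w, 0) + 1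
--     return {w: c * totalWordPrices[w] for w, c in counts.items() if w in totalWordPrices}
-- ===== Notes on version B (the rewrite author's own statement) =====
-- stated objective: idiomatic
-- what changed: Replaces per-occurrence dict accumulation (with try/except lookups) by a count-then-multiply decomposition: build a frequency table once, then emit count * price for each distinct priced word in a single comprehension.
import Mathlib
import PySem

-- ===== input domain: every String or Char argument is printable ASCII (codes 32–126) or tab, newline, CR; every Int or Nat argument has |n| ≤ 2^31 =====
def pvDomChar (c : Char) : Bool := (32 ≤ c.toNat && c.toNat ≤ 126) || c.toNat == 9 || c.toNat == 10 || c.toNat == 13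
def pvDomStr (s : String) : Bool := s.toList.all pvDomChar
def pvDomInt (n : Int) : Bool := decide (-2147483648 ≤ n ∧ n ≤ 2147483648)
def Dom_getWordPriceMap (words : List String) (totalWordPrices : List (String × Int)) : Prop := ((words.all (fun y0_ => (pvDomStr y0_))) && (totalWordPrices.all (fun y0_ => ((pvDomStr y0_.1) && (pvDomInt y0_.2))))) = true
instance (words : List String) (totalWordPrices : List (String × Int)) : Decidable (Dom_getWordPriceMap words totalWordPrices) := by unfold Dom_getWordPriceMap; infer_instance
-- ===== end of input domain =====

-- B replaces A's per-occurrence accumulation (try/except lookups) by count-then-multiply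
-- over the distinct words (idiomatic; same first-appearance key order).

-- ===== PORT A =====
-- A: accumulate prices per word, one dict update per occurrence; words without a price are skipped.
def getWordPriceMap (words : List String) (totalWordPrices : List (String × Int)) : List (String × Int) :=
  (words.foldl (fun d w =>
    match List.lookup w totalWordPrices with
    | none => d                 -- 'except KeyError: continue'
    | some p =>
      match d.get? w with
      | some v => d.insert w (v + p)
      | none => d.insert w p) PySem.Dict.empty).items

-- ===== PORT B =====
-- B: frequency table once, then count * price for each distinct priced word.
def getWordPriceMap_alt (words : List String) (totalWordPrices : List (String × Int)) : List (String × Int) :=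
  let counts := words.foldl (fun c w => c.insert w (c.getD w 0 + 1)) PySem.Dict.empty
  (counts.items.filter (fun p => (List.lookup p.1 totalWordPrices).isSome)).map
    (fun p => (p.1, p.2 * (List.lookup p.1 totalWordPrices).getD 0))

-- ===== PRECONDITION & SPEC =====
def Spec_getWordPriceMap (words : List String) (totalWordPrices : List (String × Int)) (out : List (String × Int)) : Prop := out = getWordPriceMap_alt words totalWordPrices
instance (words : List String) (totalWordPrices : List (String × Int)) (out : List (String × Int)) : Decidable (Spec_getWordPriceMap words totalWordPrices out) := by unfold Spec_getWordPriceMap; infer_instance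

-- ===== CLAIM (what is proved, stated in full; the proofs are below) =====
def Claim_equal_getWordPriceMap : Prop := ∀ (words : List String) (totalWordPrices : List (String × Int)), Dom_getWordPriceMap words totalWordPrices → Spec_getWordPriceMap words totalWordPrices (getWordPriceMap words totalWordPrices)

-- ===== LEMMAS AND PROOFS =====

-- The common normal form: for each distinct priced word (first-appearance order), count × price.
def pvRender (tot : List (String × Int)) (ws : List String) : List (String × Int) :=
  ((PySem.Set.ofList ws).filter (fun w => (List.lookup w tot).isSome)).map
    (fun w => (w, (ws.count w : Int) * (List.lookup w tot).getD 0))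

def pvStepA (tot : List (String × Int)) (d : PySem.Dict String Int) (w : String) : PySem.Dict String Int :=
  match List.lookup w tot with
  | none => d
  | some p =>
    match d.get? w with
    | some v => d.insert w (v + p)
    | none => d.insert w p

lemma pvFoldA_items (tot : List (String × Int)) (ws : List String) :
    (ws.foldl (pvStepA tot) PySem.Dict.empty).items = pvRender tot ws := by
  induction ws using List.reverseRecOn with
  | nil => rfl
  | append_singleton ws w ih =>
    have hkeys : (ws.foldl (pvStepA tot) PySem.Dict.empty).keys
        = (PySem.Set.ofList ws).filter (fun w => (List.lookup w tot).isSome) := by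
      have hid : ((fun x : String × Int => x.1) ∘
          fun w => (w, (ws.count w : Int) * (List.lookup w tot).getD 0)) = id := rfl
      simp [PySem.Dict.keys, ih, pvRender, List.map_map, hid]
    have hnd : ((PySem.Set.ofList ws).filter (fun w => (List.lookup w tot).isSome)).Nodup :=
      (PySem.Set.nodup_ofList ws).filter _
    rw [List.foldl_append, List.foldl_cons, List.foldl_nil]
    set d := ws.foldl (pvStepA tot) PySem.Dict.empty with hd
    unfold pvStepA
    rcases h : List.lookup w tot with _ | p
    · -- w has no price: state unchanged, rendered list unchanged
      rw [ih]
      unfold pvRender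
      rw [PySem.Set.ofList_append_singleton, PySem.Set.add_eq_ite]
      split_ifs with hw
      · apply List.map_congr_left
        intro x hx
        have hxP := List.of_mem_filter hx
        have hxw : x ≠ w := by
          intro he; subst he
          simp [h] at hxP
        have hc0 : List.count x [w] = 0 := by simp [List.count_eq_zero, hxw]
        simp [List.count_append, hc0]
      · rw [List.filter_append]
        have : List.filter (fun w => (List.lookup w tot).isSome) [w] = [] := by
          simp [h]
        rw [this, List.append_nil]
        apply List.map_congr_left
        intro x hx
        have hxP := List.of_mem_filter hx
        have hxw : x ≠ w := by
          intro he; subst he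
          simp [h] at hxP
        have hc0 : List.count x [w] = 0 := by simp [List.count_eq_zero, hxw]
        simp [List.count_append, hc0]
    · -- w has price p
      by_cases hw : w ∈ ws
      · -- w already counted: in-place overwrite matches updated count
        have hwf : w ∈ (PySem.Set.ofList ws).filter (fun w => (List.lookup w tot).isSome) := by
          apply List.mem_filter.2
          exact ⟨(PySem.Set.mem_ofList _ _).2 hw, by simp [h]⟩
        have hitem : (w, (ws.count w : Int) * p) ∈ d.items := by
          rw [ih]; unfold pvRender
          refine List.mem_map.2 ⟨w, hwf, ?_⟩
          simp [h]
        have hndk : d.keys.Nodup := by rw [hkeys]; exact hnd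
        have hget : d.get? w = some ((ws.count w : Int) * p) :=
          PySem.Dict.get?_of_mem_items _ hitem hndk
        rw [hget]
        have hcont : d.contains w = true := by
          rw [PySem.Dict.contains_iff_mem_keys, hkeys]; exact hwf
        rw [PySem.Dict.items_insert_of_contains _ _ hcont, ih]
        unfold pvRender
        rw [PySem.Set.ofList_append_singleton, PySem.Set.add_of_mem ((PySem.Set.mem_ofList _ _).2 hw)]
        rw [List.map_map]
        apply List.map_congr_left
        intro x hx
        by_cases hxw : x = w
        · subst hxw
          have hc : (ws ++ [x]).count x = ws.count x + 1 := by simp [List.count_append]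
          simp only [Function.comp_apply, beq_self_eq_true, if_true, hc, h, Option.getD_some,
            Prod.mk.injEq, true_and]
          push_cast; ring
        · have hbe : (x == w) = false := beq_false_of_ne hxw
          simp only [Function.comp_apply, hbe, Bool.false_eq_true, if_false]
          have hc0 : List.count x [w] = 0 := by simp [List.count_eq_zero, hxw]
          simp [List.count_append, hc0]
      · -- first occurrence of w: append matches new entry (w, 1 * p)
        have hget : d.get? w = none := by
          rw [PySem.Dict.get?_eq_none_iff_not_mem_keys, hkeys]
          intro hmem
          exact hw ((PySem.Set.mem_ofList _ _).1 (List.mem_of_mem_filter hmem))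
        rw [hget]
        have hcont : d.contains w = false := by
          rw [← Bool.not_eq_true, PySem.Dict.contains_iff_mem_keys, hkeys]
          intro hmem
          exact hw ((PySem.Set.mem_ofList _ _).1 (List.mem_of_mem_filter hmem))
        rw [PySem.Dict.items_insert_of_not_contains _ _ hcont, ih]
        unfold pvRender
        rw [PySem.Set.ofList_append_singleton,
            PySem.Set.add_of_not_mem (fun hm => hw ((PySem.Set.mem_ofList _ _).1 hm))]
        rw [List.filter_append, List.map_append]
        congr 1
        · apply List.map_congr_left
          intro x hx
          have hxw : x ≠ w := by
            intro he; subst he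
            exact hw ((PySem.Set.mem_ofList _ _).1 (List.mem_of_mem_filter hx))
          have hc0 : List.count x [w] = 0 := by simp [List.count_eq_zero, hxw]
          simp [List.count_append, hc0]
        · have : List.filter (fun w => (List.lookup w tot).isSome) [w] = [w] := by simp [h]
          rw [this]
          simp [List.count_append, List.count_eq_zero.2 hw, h]

lemma pvAlt_render (ws : List String) (tot : List (String × Int)) :
    getWordPriceMap_alt ws tot = pvRender tot ws := by
  unfold getWordPriceMap_alt pvRender
  simp only [PySem.Dict.foldl_insert_getD_add_one_eq_counter, PySem.Dict.items_counter,
    List.filter_map, List.map_map]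
  rfl

-- ===== VERDICT (by name: the statement is the Claim_ definition above) =====
theorem getWordPriceMap_spec : Claim_equal_getWordPriceMap := by
  intro words tot _
  unfold Spec_getWordPriceMap
  rw [pvAlt_render, ← pvFoldA_items]
  rfl
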